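-- pv_equiv track=rewrite | github.com/harsh-kumar-tomar/LeetCode | LeetCode/1422. Maximum Score After Splitting a String.py | maxScore2
-- ===== SOURCE A (Python) =====
-- def maxScore2(s: str) -> int:
--     n = len(s)
--     count_ones = []
--     prev_one = 0
--     count_zero = 0
--     max_sum = float('-inf')
--
--     for char in s:
--         if char == "1":
--             prev_one += 1
--         count_ones.append(prev_one)
--
--     for index,value in  enumerate(s):
--         if value == "0":
--             count_zero += 1
--
--         left = count_zero
--         right = prev_one - count_ones[index]
--         max_sum = max(max_sum,left+right)
--
--     return max_sum
-- ===== SOURCE B (Python) =====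
-- def maxScore2(s: str) -> int:
--     return max(s[:k].count("0") + s[k:].count("1") for k in range(1, len(s) + 1))
-- ===== Notes on version B (the rewrite author's own statement) =====
-- stated objective: simpler
-- what changed: Replaces the prefix-ones table plus running-zero scan with a one-line maximum over split positions, counting zeros/ones in each slice directly.
-- outside the precondition, e.g. on maxScore2(''): A returns -inf, B raises ValueError
import Mathlib
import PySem

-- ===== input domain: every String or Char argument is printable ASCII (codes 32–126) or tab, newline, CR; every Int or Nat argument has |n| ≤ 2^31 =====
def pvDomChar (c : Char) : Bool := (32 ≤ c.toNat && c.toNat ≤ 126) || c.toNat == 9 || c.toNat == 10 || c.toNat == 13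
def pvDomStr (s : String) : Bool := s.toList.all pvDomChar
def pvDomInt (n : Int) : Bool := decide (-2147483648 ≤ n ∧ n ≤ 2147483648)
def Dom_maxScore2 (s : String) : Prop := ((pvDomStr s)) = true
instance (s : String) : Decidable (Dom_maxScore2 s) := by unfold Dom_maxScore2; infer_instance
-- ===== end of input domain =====

-- B replaces A's prefix-ones table and running-zero scan by a direct maximum over
-- split positions, recounting each slice (objective: simpler; not faster).

-- ===== PORT A =====
-- models Python's max(max_sum, v) where max_sum starts at minus infinity: none = no value yet
def pyMaxNegInf (o : Option Int) (x : Int) : Option Int := some (o.elim x (fun m => max m x))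

def maxScore2 (s : String) : Int :=
  let cs := s.toList
  let st1 := cs.foldl (fun (st : Int × List Int) c =>
      let p := if c = '1' then st.1 + 1 else st.1
      (p, st.2 ++ [p])) (0, [])
  let st2 := (PySem.List.enumerate cs 0).foldl (fun (st : Int × Option Int) iv =>
      let cz := if iv.2 = '0' then st.1 + 1 else st.1
      (cz, pyMaxNegInf st.2 (cz + (st1.1 - PySem.List.pyGetD st1.2 iv.1 0)))) (0, none)
  st2.2.getD 0   -- s = "" is excluded by Pre_ (Python returns minus infinity there, a float)

-- ===== PORT B =====
def maxScore2_alt (s : String) : Int :=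
  let cs := s.toList
  (PySem.List.max?
    ((PySem.List.pyRange 1 ((cs.length : Int) + 1) 1).map (fun k =>
        ((PySem.List.slice cs none (some k)).count '0' : Int) +
        ((PySem.List.slice cs (some k) none).count '1' : Int)))
    (fun x => x)).getD 0   -- s = "" is excluded by Pre_ (Python raises ValueError there)

-- ===== PRECONDITION & SPEC =====
-- Pre_ excludes only the empty string, on which A returns minus infinity (a float, not an int)
-- and B's max() of an empty sequence raises ValueError.
def Pre_maxScore2 (s : String) : Prop := s ≠ ""
instance (s : String) : Decidable (Pre_maxScore2 s) := by unfold Pre_maxScore2; infer_instance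
def pvWitness_maxScore2 : String := "011"

def Spec_maxScore2 (s : String) (out : Int) : Prop := out = maxScore2_alt s
instance (s : String) (out : Int) : Decidable (Spec_maxScore2 s out) := by unfold Spec_maxScore2; infer_instance

-- ===== CLAIM (what is proved, stated in full; the proofs are below) =====
def Claim_equal_maxScore2 : Prop := ∀ (s : String), Dom_maxScore2 s → Pre_maxScore2 s → Spec_maxScore2 s (maxScore2 s)

-- ===== LEMMAS AND PROOFS =====

-- the per-index values computed by A's second loop (proof-side reference)
def pvVals (t : List Char) (s z : Int) (q : Int → Int) : List Int :=
  match t with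
  | [] => []
  | c :: r => ((if c = '0' then z + 1 else z) + q s) :: pvVals r (s + 1) (if c = '0' then z + 1 else z) q

theorem pv_fold1_eq (t : List Char) (a : Int) (acc : List Int) :
    t.foldl (fun (st : Int × List Int) c =>
      let p := if c = '1' then st.1 + 1 else st.1
      (p, st.2 ++ [p])) (a, acc)
    = (a + (t.count '1' : Int),
       acc ++ (List.range t.length).map (fun i => a + ((t.take (i+1)).count '1' : Int))) := by
  induction t generalizing a acc with
  | nil => simp
  | cons c r ih =>
    simp only [List.foldl_cons, List.length_cons, List.range_succ_eq_map, List.map_cons,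
      List.map_map, ih, Prod.mk.injEq]
    constructor
    · by_cases hc : c = '1' <;> simp [hc, List.count_cons] <;> push_cast <;> ring
    · rw [List.append_assoc, List.singleton_append]
      refine congrArg (acc ++ ·) (congrArg₂ List.cons ?_ ?_)
      · by_cases hc : c = '1' <;> simp [hc]
      · refine List.map_congr_left fun i _ => ?_
        show (if c = '1' then a + 1 else a) + _ = a + ((List.count '1' (c :: r.take (i+1)) : Nat) : Int)
        by_cases hc : c = '1' <;> simp [hc, List.count_cons] <;> push_cast <;> ring

theorem pv_fold2_eq (t : List Char) (s z : Int) (o : Option Int) (q : Int → Int) :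
    (PySem.List.enumerate t s).foldl (fun (st : Int × Option Int) iv =>
      let cz := if iv.2 = '0' then st.1 + 1 else st.1
      (cz, pyMaxNegInf st.2 (cz + q iv.1))) (z, o)
    = (z + (t.count '0' : Int), (pvVals t s z q).foldl pyMaxNegInf o) := by
  induction t generalizing s z o with
  | nil => simp [PySem.List.enumerate_nil, pvVals]
  | cons c r ih =>
    simp only [PySem.List.enumerate_cons, List.foldl_cons, pvVals, ih]
    by_cases hc : c = '0' <;> simp [hc, List.count_cons] <;> push_cast <;> ring_nf

theorem pv_vals_eq (t : List Char) (s z : Int) (q : Int → Int) :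
    pvVals t s z q
    = (List.range t.length).map (fun i => (z + ((t.take (i+1)).count '0' : Int)) + q (s + i)) := by
  induction t generalizing s z with
  | nil => simp [pvVals]
  | cons c r ih =>
    simp only [pvVals, List.length_cons, List.range_succ_eq_map, List.map_cons, List.map_map, ih,
      List.cons.injEq]
    refine ⟨?_, List.map_congr_left fun i _ => ?_⟩
    · by_cases hc : c = '0' <;> simp [hc]
    · show _ + q (s + 1 + (i : Int))
        = (z + ((List.count '0' (c :: r.take (i+1)) : Nat) : Int)) + q (s + ((i+1 : Nat) : Int))
      have hq : s + 1 + (i : Int) = s + ((i+1 : Nat) : Int) := by push_cast; ring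
      rw [hq]
      by_cases hc : c = '0' <;> simp [hc, List.count_cons] <;> push_cast <;> ring

theorem pv_foldl_pyMax (l : List Int) (m : Int) :
    l.foldl pyMaxNegInf (some m) = some (l.foldl max m) := by
  induction l generalizing m with
  | nil => rfl
  | cons x t ih => simp [pyMaxNegInf, ih]

theorem pv_count_take_drop (cs : List Char) (v : Char) (k : Nat) :
    ((cs.take k).count v : Int) + ((cs.drop k).count v : Int) = (cs.count v : Int) := by
  rw [← Nat.cast_add, ← List.count_append, List.take_append_drop]

theorem pv_close (l : List Int) (x : Int) :
    ((x :: l).foldl pyMaxNegInf none).getD 0 = (PySem.List.max? (x :: l) (fun y => y)).getD 0 := by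
  rw [PySem.List.max?_id_cons]
  show (l.foldl pyMaxNegInf (some x)).getD 0 = _
  rw [pv_foldl_pyMax]

theorem maxScore2_spec : Claim_equal_maxScore2 := by
  intro s _ hpre
  unfold Spec_maxScore2 maxScore2 maxScore2_alt
  have hcs : s.toList ≠ [] := fun h => hpre (String.toList_eq_nil_iff.mp h)
  simp only [pv_fold1_eq]
  rw [pv_fold2_eq s.toList 0 0 none
    (fun j => 0 + (List.count '1' s.toList : Int) -
      PySem.List.pyGetD ([] ++ (List.range s.toList.length).map
        (fun i => 0 + ((List.count '1' (s.toList.take (i+1)) : Nat) : Int))) j 0)]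
  rw [pv_vals_eq]
  have key : ∀ i ∈ List.range s.toList.length,
      (0 + ((List.count '0' (s.toList.take (i+1)) : Nat) : Int) +
        (0 + (List.count '1' s.toList : Int) -
          PySem.List.pyGetD ([] ++ (List.range s.toList.length).map
            (fun i => 0 + ((List.count '1' (s.toList.take (i+1)) : Nat) : Int))) (0 + (i : Int)) 0))
      = ((List.count '0' (s.toList.take (i+1)) : Nat) : Int) +
        ((List.count '1' (s.toList.drop (i+1)) : Nat) : Int) := by
    intro i hi
    rw [List.mem_range] at hi
    rw [show ((0 : Int) + (i : Int)) = ((i : Nat) : Int) by ring, PySem.List.pyGetD_natCast]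
    rw [List.nil_append, List.getD_eq_getElem?_getD, List.getElem?_map, List.getElem?_range hi]
    have := pv_count_take_drop s.toList '1' (i+1)
    simp only [Option.map_some, Option.getD_some]
    omega
  rw [List.map_congr_left key]
  rw [PySem.List.pyRange_one]
  rw [show ((s.toList.length : Int) + 1 - 1).toNat = s.toList.length by simp]
  rw [List.map_map]
  have key2 : ∀ k ∈ List.range s.toList.length,
      ((fun k => ((List.count '0' (PySem.List.slice s.toList none (some k)) : Nat) : Int) +
        ((List.count '1' (PySem.List.slice s.toList (some k) none) : Nat) : Int)) ∘
        (fun k : Nat => (1 : Int) + (k : Int))) k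
      = ((List.count '0' (s.toList.take (k+1)) : Nat) : Int) +
        ((List.count '1' (s.toList.drop (k+1)) : Nat) : Int) := by
    intro k _
    simp only [Function.comp_apply]
    rw [show ((1 : Int) + (k : Int)) = (((k+1 : Nat)) : Int) by push_cast; ring]
    rw [PySem.List.slice_to_natCast, PySem.List.slice_from_natCast]
  rw [List.map_congr_left key2]
  obtain ⟨c, r, hr⟩ : ∃ c r, s.toList = c :: r := by
    cases h : s.toList with
    | nil => exact absurd h hcs
    | cons c r => exact ⟨c, r, rfl⟩
  rw [hr, List.length_cons, List.range_succ_eq_map, List.map_cons]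
  exact pv_close _ _
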